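-- pv_equiv track=rewrite | github.com/asethi3/aoc-solutions | 2023/day15/solution.py | part_1
-- ===== SOURCE A (Python) =====
-- def part_1(data):
--     steps = data[0].split(",")
--     total = 0
--     for step in steps:
--         curr = 0
--         for c in step:
--             curr = ((curr + ord(c)) * 17) % 256
--         total += curr
--     return total
-- ===== SOURCE B (Python) =====
-- def part_1(data):
--     total = 0
--     curr = 0
--     for c in data[0]:
--         if c == ',':
--             total += curr
--             curr = 0
--         else:
--             curr = ((curr + ord(c)) * 17) % 256
--     total += curr
--     return total
-- ===== Notes on version B (the rewrite author's own statement) =====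
-- stated objective: alternative
-- what changed: B makes a single flat pass over the raw string, flushing the running hash at each comma, instead of first splitting into a list of steps and hashing each in a nested loop.
-- outside the precondition, e.g. on part_1([]): A raises IndexError, B raises IndexError
import Mathlib
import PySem

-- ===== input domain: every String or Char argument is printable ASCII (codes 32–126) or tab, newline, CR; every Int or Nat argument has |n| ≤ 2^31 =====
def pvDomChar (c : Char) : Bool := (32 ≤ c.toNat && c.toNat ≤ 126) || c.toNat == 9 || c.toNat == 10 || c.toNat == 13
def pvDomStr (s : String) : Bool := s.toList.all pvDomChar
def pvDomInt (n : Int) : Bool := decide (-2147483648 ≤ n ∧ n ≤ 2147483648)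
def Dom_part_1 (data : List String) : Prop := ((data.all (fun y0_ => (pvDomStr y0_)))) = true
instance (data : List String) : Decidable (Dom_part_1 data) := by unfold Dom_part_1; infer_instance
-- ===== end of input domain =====

-- B replaces split-then-hash-each-step by one flat pass over data[0], flushing the
-- running hash at each comma; equivalence of return values is proved on Pre_ below.

-- ===== PORT A =====
def part_1 (data : List String) : Int :=
  match PySem.List.pyGet? data 0 with
  | none => 0   -- Python raises IndexError here; excluded by Pre_part_1
  | some s =>
    let steps := PySem.Chars.splitOn s.toList [',']
    steps.foldl
      (fun total step =>
        total + step.foldl (fun curr c => ((curr + (c.toNat : Int)) * 17) % 256) 0)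
      0

-- ===== PORT B =====
def part_1_alt (data : List String) : Int :=
  match PySem.List.pyGet? data 0 with
  | none => 0   -- Python raises IndexError here; excluded by Pre_part_1
  | some s =>
    let p := s.toList.foldl
      (fun (tc : Int × Int) c =>
        if c = ',' then (tc.1 + tc.2, 0)
        else (tc.1, ((tc.2 + (c.toNat : Int)) * 17) % 256))
      (0, 0)
    p.1 + p.2

-- ===== PRECONDITION & SPEC =====
-- Pre_ excludes only the empty list, on which A raises IndexError (data[0]).
def Pre_part_1 (data : List String) : Prop := data ≠ []
instance (data : List String) : Decidable (Pre_part_1 data) := by unfold Pre_part_1; infer_instance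
def pvWitness_part_1 : List String := (["rn=1,cm-"])
def Spec_part_1 (data : List String) (out : Int) : Prop := out = part_1_alt data
instance (data : List String) (out : Int) : Decidable (Spec_part_1 data out) := by unfold Spec_part_1; infer_instance

-- ===== CLAIM (what is proved, stated in full; the proofs are below) =====
def Claim_equal_part_1 : Prop := ∀ (data : List String), Dom_part_1 data → Pre_part_1 data → Spec_part_1 data (part_1 data)

-- ===== LEMMAS AND PROOFS =====

-- the AoC hash of a segment, starting from accumulator `curr`
def pvHash (curr : Int) (l : List Char) : Int :=
  l.foldl (fun curr c => ((curr + (c.toNat : Int)) * 17) % 256) curr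

-- comma-splitting of a character list (Python split(",") on a nonempty separator)
def pvSplit : List Char → List (List Char)
  | [] => [[]]
  | c :: rest => if c = ',' then [] :: pvSplit rest else (pvSplit rest).modifyHead (c :: ·)

theorem pvSplit_ne_nil (l : List Char) : pvSplit l ≠ [] := by
  cases l with
  | nil => simp [pvSplit]
  | cons c rest =>
    simp only [pvSplit]
    split
    · simp
    · cases h : pvSplit rest with
      | nil => exact absurd h (pvSplit_ne_nil rest)
      | cons s ss => simp

theorem pvGo_eq (fuel : Nat) (l cur : List Char) (acc : List (List Char))
    (h : l.length ≤ fuel) :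
    PySem.Chars.splitOn.go [','] fuel l cur acc
      = acc.reverse ++ (pvSplit l).modifyHead (cur.reverse ++ ·) := by
  induction fuel generalizing l cur acc with
  | zero =>
    have : l = [] := List.length_eq_zero_iff.mp (Nat.le_zero.mp h)
    subst this
    simp [PySem.Chars.splitOn.go, pvSplit]
  | succ fuel ih =>
    cases l with
    | nil => simp [PySem.Chars.splitOn.go, pvSplit]
    | cons c rest =>
      by_cases hc : c = ','
      · subst hc
        have : List.isPrefixOf [','] (',' :: rest) = true := by simp [List.isPrefixOf]
        rw [PySem.Chars.splitOn.go]
        simp only [this, if_true]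
        rw [show List.drop [','].length (',' :: rest) = rest from rfl, ih rest [] (cur.reverse :: acc) (by simpa using Nat.lt_succ_iff.mp (by simpa using h))]
        cases hs : pvSplit rest with
        | nil => exact absurd hs (pvSplit_ne_nil rest)
        | cons s ss => simp [pvSplit, hs]
      · have hpre : List.isPrefixOf [','] (c :: rest) = false := by
          simp only [List.isPrefixOf, Bool.and_eq_false_iff, beq_eq_false_iff_ne]
          exact Or.inl fun hh => hc hh.symm
        rw [PySem.Chars.splitOn.go]
        simp only [hpre, Bool.false_eq_true, if_false]
        rw [ih rest (c :: cur) acc (by simpa using Nat.lt_succ_iff.mp (by simpa using h))]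
        cases hs : pvSplit rest with
        | nil => exact absurd hs (pvSplit_ne_nil rest)
        | cons s ss => simp [pvSplit, hs, hc]

theorem pvSplitOn_eq (l : List Char) :
    PySem.Chars.splitOn l [','] = pvSplit l := by
  unfold PySem.Chars.splitOn
  rw [pvGo_eq l.length.succ l [] [] (Nat.le_succ _)]
  cases hs : pvSplit l with
  | nil => exact absurd hs (pvSplit_ne_nil l)
  | cons s ss => simp

theorem pvFoldl_add (f : List Char → Int) (segs : List (List Char)) (t : Int) :
    segs.foldl (fun t s => t + f s) t = t + (segs.map f).sum := by
  induction segs generalizing t with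
  | nil => simp
  | cons s ss ih => simp [ih, add_assoc]

theorem pvFoldB (l : List Char) (total curr : Int) :
    ((l.foldl
      (fun (tc : Int × Int) c =>
        if c = ',' then (tc.1 + tc.2, 0)
        else (tc.1, ((tc.2 + (c.toNat : Int)) * 17) % 256))
      (total, curr)).1
     + (l.foldl
      (fun (tc : Int × Int) c =>
        if c = ',' then (tc.1 + tc.2, 0)
        else (tc.1, ((tc.2 + (c.toNat : Int)) * 17) % 256))
      (total, curr)).2)
    = total + pvHash curr (pvSplit l).head! + (((pvSplit l).tail).map (pvHash 0)).sum := by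
  induction l generalizing total curr with
  | nil => simp [pvSplit, pvHash]
  | cons c rest ih =>
    by_cases hc : c = ','
    · subst hc
      simp only [List.foldl_cons, if_true, pvSplit]
      rw [ih (total + curr) 0]
      cases hs : pvSplit rest with
      | nil => exact absurd hs (pvSplit_ne_nil rest)
      | cons s ss => simp [pvHash, add_assoc]
    · simp only [List.foldl_cons, hc, if_false, pvSplit]
      rw [ih total (((curr + (c.toNat : Int)) * 17) % 256)]
      cases hs : pvSplit rest with
      | nil => exact absurd hs (pvSplit_ne_nil rest)
      | cons s ss => simp [pvHash]

-- ===== VERDICT (by name: the statement is the Claim_ definition above) =====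
theorem part_1_spec : Claim_equal_part_1 := by
  intro data _hdom _hpre
  unfold Spec_part_1 part_1 part_1_alt
  cases h : PySem.List.pyGet? data 0 with
  | none => rfl
  | some s =>
    simp only
    rw [pvSplitOn_eq, pvFoldB s.toList 0 0,
      pvFoldl_add (fun step => step.foldl (fun curr c => ((curr + (c.toNat : Int)) * 17) % 256) 0)]
    cases hs : pvSplit s.toList with
    | nil => exact absurd hs (pvSplit_ne_nil s.toList)
    | cons seg segs =>
      simp only [List.head!_cons, List.tail_cons, List.map_cons, List.sum_cons, pvHash, add_assoc]
      rfl
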